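-- pv_equiv track=rewrite | github.com/soloduev/WikiCode | WikiCode/apps/wiki/mymarkdown/mdsplit.py | isHeader
-- ===== SOURCE A (Python) =====
-- def isHeader(line):
--     headerLevel = 0
--     for ch in line:
--         if ch == '#':
--             headerLevel += 1
--         else:
--             break;
--     if headerLevel == 0:
--         return False
--     elif headerLevel <= 5:
--         return True
--     else:
--         return False
-- ===== SOURCE B (Python) =====
-- def isHeader(line):
--     return line.startswith('#') and not line.startswith('######')
-- ===== Notes on version B (the rewrite author's own statement) =====
-- stated objective: idiomatic
-- what changed: Replaces the manual char-counting loop and level comparison with two string prefix tests: the line is a header iff it starts with one hash but not with six hashes.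
import Mathlib
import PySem

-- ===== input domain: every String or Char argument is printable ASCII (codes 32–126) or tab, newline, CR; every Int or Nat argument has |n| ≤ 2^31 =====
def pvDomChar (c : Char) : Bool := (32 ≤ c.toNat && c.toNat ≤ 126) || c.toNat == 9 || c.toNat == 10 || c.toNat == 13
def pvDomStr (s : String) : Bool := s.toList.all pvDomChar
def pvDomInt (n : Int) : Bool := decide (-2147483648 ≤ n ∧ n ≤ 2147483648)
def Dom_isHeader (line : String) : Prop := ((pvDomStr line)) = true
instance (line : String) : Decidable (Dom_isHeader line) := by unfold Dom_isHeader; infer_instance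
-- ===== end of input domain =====

-- B replaces A's manual leading-'#' counting loop by two prefix tests (startswith '#' and not startswith '######'); idiomatic, same behaviour.


-- ===== PORT A =====
-- the for-loop with break: count leading '#' characters
def pvHashLoop : List Char → Nat → Nat
  | [], acc => acc
  | c :: rest, acc => if c = '#' then pvHashLoop rest (acc + 1) else acc

def isHeader (line : String) : Bool :=
  let headerLevel := pvHashLoop line.toList 0
  if headerLevel = 0 then false
  else if headerLevel ≤ 5 then true
  else false

-- ===== PORT B =====
def isHeader_alt (line : String) : Bool :=
  PySem.Str.startswith line "#" && !(PySem.Str.startswith line "######")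

-- ===== PRECONDITION & SPEC =====
def Spec_isHeader (line : String) (out : Bool) : Prop := out = isHeader_alt line
instance (line : String) (out : Bool) : Decidable (Spec_isHeader line out) := by unfold Spec_isHeader; infer_instance

-- ===== CLAIM (what is proved, stated in full; the proofs are below) =====
def Claim_equal_isHeader : Prop := ∀ (line : String), Dom_isHeader line → Spec_isHeader line (isHeader line)

-- ===== LEMMAS AND PROOFS =====
theorem pvHashLoop_acc (l : List Char) (a : Nat) :
    pvHashLoop l (a + 1) = pvHashLoop l a + 1 := by
  induction l generalizing a with
  | nil => simp [pvHashLoop]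
  | cons d t iht => by_cases hd : d = '#' <;> simp [pvHashLoop, hd, iht]

theorem pvReplicate_prefix_iff (n : Nat) (cs : List Char) :
    List.replicate n '#' <+: cs ↔ n ≤ pvHashLoop cs 0 := by
  induction cs generalizing n with
  | nil =>
    cases n with
    | zero => simp [pvHashLoop]
    | succ m => simp [pvHashLoop, List.replicate]
  | cons c rest ih =>
    cases n with
    | zero => simp
    | succ m =>
      by_cases hc : c = '#'
      · subst hc
        rw [List.replicate_succ, List.cons_prefix_cons]
        simp [pvHashLoop, pvHashLoop_acc, ih]
      · rw [List.replicate_succ, List.cons_prefix_cons]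
        simp [pvHashLoop, hc]
        intro h
        exact absurd h.symm hc

-- ===== VERDICT (by name: the statement is the Claim_ definition above) =====
theorem isHeader_spec : Claim_equal_isHeader := by
  intro line _
  unfold Spec_isHeader isHeader isHeader_alt
  simp only [PySem.Str.startswith_eq]
  have h1 : PySem.Chars.startswith line.toList ['#'] = true ↔
      (1 : Nat) ≤ pvHashLoop line.toList 0 := by
    rw [PySem.Chars.startswith_iff]
    have e : (['#'] : List Char) = List.replicate 1 '#' := by decide
    rw [e, pvReplicate_prefix_iff]
  have h6 : PySem.Chars.startswith line.toList ['#','#','#','#','#','#'] = true ↔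
      (6 : Nat) ≤ pvHashLoop line.toList 0 := by
    rw [PySem.Chars.startswith_iff]
    have e : (['#','#','#','#','#','#'] : List Char) = List.replicate 6 '#' := by decide
    rw [e, pvReplicate_prefix_iff]
  set L := pvHashLoop line.toList 0 with hL
  by_cases hz : L = 0
  · have e1 : PySem.Chars.startswith line.toList ['#'] = false := by
      cases hb : PySem.Chars.startswith line.toList ['#']
      · rfl
      · exact absurd (h1.mp hb) (by omega)
    simp [hz, e1]
  · by_cases h5 : L ≤ 5
    · have e1 : PySem.Chars.startswith line.toList ['#'] = true := h1.mpr (by omega)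
      have e6 : PySem.Chars.startswith line.toList ['#','#','#','#','#','#'] = false := by
        cases hb : PySem.Chars.startswith line.toList ['#','#','#','#','#','#']
        · rfl
        · exact absurd (h6.mp hb) (by omega)
      simp [hz, h5, e1, e6]
    · have e6 : PySem.Chars.startswith line.toList ['#','#','#','#','#','#'] = true :=
        h6.mpr (by omega)
      simp [hz, h5, e6]
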